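-- pv_equiv track=rewrite | github.com/vlad-bezden/py.checkio | sendgrid/node_crucial.py | check_network_connections
-- ===== SOURCE A (Python) =====
-- def check_network_connections(all_networks):
--     '''Checks if networks have connections, and if so join them'''
--
--     final_networks = []
--
--     for net in all_networks:
--         for sub in final_networks:
--             if net & sub:
--                 sub.update(net)
--                 break
--         else:
--             final_networks.append(net)
--
--     return final_networks
-- ===== SOURCE B (Python) =====
-- def check_network_connections(all_networks):
--     '''Checks if networks have connections, and if so join them'''
--     final_networks = []
--     owner = {}  # element -> smallest index of a final network containing it
--     for net in all_networks:
--         cands = [owner[e] for e in net if e in owner]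
--         if cands:
--             j = min(cands)
--             final_networks[j].update(net)
--         else:
--             j = len(final_networks)
--             final_networks.append(net)
--         for e in net:
--             owner[e] = j
--     return final_networks
-- ===== Notes on version B (the rewrite author's own statement) =====
-- stated objective: alternative
-- what changed: Replaces A's inner scan over all kept networks by a persistent element-to-least-index dictionary: for each incoming net the merge target is the minimum over the owners of its elements, so the inner pass over final_networks disappears.
import Mathlib
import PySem

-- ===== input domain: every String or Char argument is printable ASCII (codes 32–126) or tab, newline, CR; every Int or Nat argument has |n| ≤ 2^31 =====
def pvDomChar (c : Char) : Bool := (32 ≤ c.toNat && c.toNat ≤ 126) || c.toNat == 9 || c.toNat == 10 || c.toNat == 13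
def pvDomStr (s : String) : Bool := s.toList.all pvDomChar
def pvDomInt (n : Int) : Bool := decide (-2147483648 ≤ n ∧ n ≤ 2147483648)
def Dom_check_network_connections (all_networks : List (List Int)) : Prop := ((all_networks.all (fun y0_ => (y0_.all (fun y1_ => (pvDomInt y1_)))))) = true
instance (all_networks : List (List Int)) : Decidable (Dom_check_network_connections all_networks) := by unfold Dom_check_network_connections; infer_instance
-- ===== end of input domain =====

-- B replaces A's inner scan over the kept networks by an element→least-index dictionary
-- (objective: alternative algorithm, same measured cost). Both Pythons mutate the input sets
-- in place in the same way; the equivalence proved is about the return value.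

-- ===== PORT A =====
-- inner loop: 'for sub in final_networks: if net & sub: sub.update(net); break / else: append(net)'
def pvGoA (net : List Int) : List (List Int) → List (List Int)
  | [] => [net]
  | sub :: rest =>
    if PySem.Set.inter net sub ≠ [] then
      PySem.Set.update sub net :: rest
    else
      sub :: pvGoA net rest

def check_network_connections (all_networks : List (List Int)) : List (List Int) :=
  all_networks.foldl (fun finals net => pvGoA net finals) []

-- ===== PORT B =====
-- 'for e in net: owner[e] = j'
def pvAssign (owner : PySem.Dict Int Int) (net : List Int) (j : Int) : PySem.Dict Int Int :=
  net.foldl (fun d e => d.insert e j) owner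

def pvStepB (st : List (List Int) × PySem.Dict Int Int) (net : List Int) :
    List (List Int) × PySem.Dict Int Int :=
  let finals := st.1
  let owner := st.2
  let cands := net.filterMap (fun e => owner.get? e)
  match PySem.List.min? cands (fun x => x) with
  | some j =>
      (PySem.List.pySetD finals j (PySem.Set.update (PySem.List.pyGetD finals j []) net),
       pvAssign owner net j)
  | none =>
      (finals ++ [net], pvAssign owner net (finals.length : Int))

def check_network_connections_alt (all_networks : List (List Int)) : List (List Int) :=
  (all_networks.foldl pvStepB ([], PySem.Dict.empty)).1

-- ===== PRECONDITION & SPEC =====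
def Spec_check_network_connections (all_networks : List (List Int)) (out : List (List Int)) : Prop := out = check_network_connections_alt all_networks
instance (all_networks : List (List Int)) (out : List (List Int)) : Decidable (Spec_check_network_connections all_networks out) := by unfold Spec_check_network_connections; infer_instance

-- ===== CLAIM (what is proved, stated in full; the proofs are below) =====
def Claim_equal_check_network_connections : Prop := ∀ (all_networks : List (List Int)), Dom_check_network_connections all_networks → Spec_check_network_connections all_networks (check_network_connections all_networks)

-- ===== LEMMAS AND PROOFS =====

-- owner's intended contents: e ↦ least index of a kept network containing e
def pvOwnerSpec (finals : List (List Int)) (e : Int) : Option Int :=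
  match finals.findIdx? (fun sub => decide (e ∈ sub)) with
  | some n => some ((n : Nat) : Int)
  | none => none

def pvInv (finals : List (List Int)) (owner : PySem.Dict Int Int) : Prop :=
  ∀ e : Int, owner.get? e = pvOwnerSpec finals e

-- findIdx? characterised via getD (avoids dependent getElem proofs downstream)
theorem pv_findIdx?_char {α : Type} (p : α → Bool) (d : α) (xs : List α) (n : Nat) :
    xs.findIdx? p = some n ↔
      (n < xs.length ∧ p (xs.getD n d) = true ∧ ∀ k, k < n → p (xs.getD k d) = false) := by
  rw [List.findIdx?_eq_some_iff_getElem]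
  constructor
  · rintro ⟨h, h2, h3⟩
    refine ⟨h, ?_, ?_⟩
    · rwa [List.getD_eq_getElem?_getD, List.getElem?_eq_getElem h]
    · intro k hk
      rw [List.getD_eq_getElem?_getD, List.getElem?_eq_getElem (by omega)]
      simpa using h3 k hk
  · rintro ⟨h, h2, h3⟩
    refine ⟨h, ?_, ?_⟩
    · rwa [List.getD_eq_getElem?_getD, List.getElem?_eq_getElem h] at h2
    · intro k hk
      have := h3 k hk
      rw [List.getD_eq_getElem?_getD, List.getElem?_eq_getElem (by omega)] at this
      simpa using this

theorem pv_set_getD {α : Type} (xs : List α) (n : Nat) (v : α) (k : Nat) (d : α) :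
    (xs.set n v).getD k d = if k = n ∧ n < xs.length then v else xs.getD k d := by
  split_ifs with h
  · obtain ⟨rfl, h2⟩ := h
    simp [List.getD_eq_getElem?_getD, h2]
  · by_cases hk : k = n
    · subst hk
      have hnl : ¬ k < xs.length := by tauto
      simp [List.getD_eq_getElem?_getD, hnl]
    · simp [List.getD_eq_getElem?_getD, List.getElem?_set_ne (by omega : n ≠ k)]

theorem pv_inter_ne_iff (net sub : List Int) :
    (PySem.Set.inter net sub ≠ []) ↔ ∃ e ∈ net, e ∈ sub := by
  constructor
  · intro h
    obtain ⟨x, hx⟩ := List.exists_mem_of_ne_nil _ h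
    rw [PySem.Set.mem_inter] at hx
    exact ⟨x, hx.1, hx.2⟩
  · rintro ⟨e, he, hes⟩ hnil
    have : e ∈ PySem.Set.inter net sub := by rw [PySem.Set.mem_inter]; exact ⟨he, hes⟩
    rw [hnil] at this; simp at this

theorem pv_goA_none (net : List Int) (finals : List (List Int))
    (h : finals.findIdx? (fun sub => decide (∃ e ∈ net, e ∈ sub)) = none) :
    pvGoA net finals = finals ++ [net] := by
  induction finals with
  | nil => rfl
  | cons sub rest ih =>
    rw [List.findIdx?_cons] at h
    by_cases hp : (∃ e ∈ net, e ∈ sub)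
    · simp [hp] at h
    · have hne : ¬ (PySem.Set.inter net sub ≠ []) := by
        rw [pv_inter_ne_iff]; exact hp
      simp only [hp, decide_false] at h
      rw [if_neg (by simp)] at h
      simp only [pvGoA, if_neg hne]
      rw [ih (by simpa using h)]
      rfl

theorem pv_goA_some (net : List Int) (finals : List (List Int)) (n : Nat)
    (h : finals.findIdx? (fun sub => decide (∃ e ∈ net, e ∈ sub)) = some n) :
    pvGoA net finals = finals.set n (PySem.Set.update (finals.getD n []) net) := by
  induction finals generalizing n with
  | nil => simp at h
  | cons sub rest ih =>
    rw [List.findIdx?_cons] at h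
    by_cases hp : (∃ e ∈ net, e ∈ sub)
    · have hne : PySem.Set.inter net sub ≠ [] := (pv_inter_ne_iff net sub).2 hp
      simp only [hp, decide_true] at h
      cases h
      simp [pvGoA, hne]
    · have hne : ¬ (PySem.Set.inter net sub ≠ []) := by
        rw [pv_inter_ne_iff]; exact hp
      simp only [hp, decide_false] at h
      rw [if_neg (by simp)] at h
      rw [Option.map_eq_some_iff] at h
      obtain ⟨m, hm, rfl⟩ := h
      simp only [pvGoA, if_neg hne]
      rw [ih m hm]
      rfl

theorem pv_get?_assign (owner : PySem.Dict Int Int) (net : List Int) (j : Int) (e : Int) :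
    (pvAssign owner net j).get? e = if e ∈ net then some j else owner.get? e := by
  induction net generalizing owner with
  | nil => simp [pvAssign]
  | cons x t ih =>
    simp only [pvAssign, List.foldl_cons] at *
    rw [ih]
    by_cases ht : e ∈ t
    · simp [ht]
    · by_cases hx : e = x
      · subst hx; simp [ht, PySem.Dict.get?_insert_self]
      · simp [ht, hx, PySem.Dict.get?_insert_of_ne _ _ hx]

theorem pvStepB_eq (finals : List (List Int)) (owner : PySem.Dict Int Int) (net : List Int) :
    pvStepB (finals, owner) net =
      match PySem.List.min? (net.filterMap (fun e => owner.get? e)) (fun x => x) with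
      | some j =>
          (PySem.List.pySetD finals j (PySem.Set.update (PySem.List.pyGetD finals j []) net),
           pvAssign owner net j)
      | none => (finals ++ [net], pvAssign owner net (finals.length : Int)) := rfl

-- the single-step equivalence: under the invariant, B's step returns A's step and preserves the invariant
theorem pv_step (finals : List (List Int)) (owner : PySem.Dict Int Int) (net : List Int)
    (hInv : pvInv finals owner) :
    (pvStepB (finals, owner) net).1 = pvGoA net finals ∧
      pvInv (pvGoA net finals) (pvStepB (finals, owner) net).2 := by
  have hcand : ∀ j : Int,
      j ∈ net.filterMap (fun e => owner.get? e) ↔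
        ∃ e ∈ net, ∃ n : Nat, finals.findIdx? (fun sub => decide (e ∈ sub)) = some n ∧ j = (n : Int) := by
    intro j
    rw [List.mem_filterMap]
    constructor
    · rintro ⟨e, he, hj⟩
      rw [hInv e] at hj
      unfold pvOwnerSpec at hj
      cases hfi : finals.findIdx? (fun sub => decide (e ∈ sub)) with
      | none => rw [hfi] at hj; simp at hj
      | some n =>
        rw [hfi] at hj
        have hj' : ((n : Nat) : Int) = j := by injection hj
        exact ⟨e, he, n, hfi, hj'.symm⟩
    · rintro ⟨e, he, n, hn, rfl⟩
      exact ⟨e, he, by rw [hInv e]; unfold pvOwnerSpec; rw [hn]⟩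
  rw [pvStepB_eq]
  cases hmin : PySem.List.min? (net.filterMap (fun e => owner.get? e)) (fun x => x) with
  | none =>
    -- no element of net is owned: both sides append net
    have hempty : net.filterMap (fun e => owner.get? e) = [] :=
      (PySem.List.min?_eq_none_iff _ _).1 hmin
    have hnone : ∀ e ∈ net, finals.findIdx? (fun sub => decide (e ∈ sub)) = none := by
      intro e he
      cases hfe : finals.findIdx? (fun sub => decide (e ∈ sub)) with
      | none => rfl
      | some n =>
        have : ((n : Nat) : Int) ∈ net.filterMap (fun e => owner.get? e) :=
          (hcand _).2 ⟨e, he, n, hfe, rfl⟩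
        rw [hempty] at this; simp at this
    have hA : finals.findIdx? (fun sub => decide (∃ e ∈ net, e ∈ sub)) = none := by
      rw [List.findIdx?_eq_none_iff]
      intro sub hsub
      simp only [decide_eq_false_iff_not]
      rintro ⟨e, he, hes⟩
      have := (List.findIdx?_eq_none_iff.1 (hnone e he)) sub hsub
      simp [hes] at this
    rw [pv_goA_none net finals hA]
    refine ⟨rfl, ?_⟩
    intro e
    rw [pv_get?_assign]
    by_cases he : e ∈ net
    · -- e is new: its least owner is the appended net, at index finals.length
      rw [if_pos he]
      unfold pvOwnerSpec
      have hnew : (finals ++ [net]).findIdx? (fun sub => decide (e ∈ sub)) = some finals.length := by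
        rw [pv_findIdx?_char (d := [])]
        refine ⟨by simp, ?_, ?_⟩
        · have hg : (finals ++ [net]).getD finals.length [] = net := by
            simp [List.getD_eq_getElem?_getD]
          rw [hg]; simpa using he
        · intro k hk
          have hg : (finals ++ [net]).getD k [] = finals.getD k [] := by
            simp [List.getD_eq_getElem?_getD, List.getElem?_append_left hk]
          rw [hg]
          have hmem : finals.getD k [] ∈ finals := by
            rw [List.getD_eq_getElem?_getD, List.getElem?_eq_getElem hk]
            exact List.getElem_mem hk
          have := (List.findIdx?_eq_none_iff.1 (hnone e he)) (finals.getD k []) hmem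
          simpa using this
      rw [hnew]
    · rw [if_neg he, hInv e]
      unfold pvOwnerSpec
      have hfix : (finals ++ [net]).findIdx? (fun sub => decide (e ∈ sub))
          = finals.findIdx? (fun sub => decide (e ∈ sub)) := by
        cases hfe : finals.findIdx? (fun sub => decide (e ∈ sub)) with
        | some n =>
          rw [pv_findIdx?_char (d := [])] at hfe
          obtain ⟨h1, h2, h3⟩ := hfe
          rw [pv_findIdx?_char (d := [])]
          refine ⟨by simp; omega, ?_, ?_⟩
          · rwa [List.getD_eq_getElem?_getD, List.getElem?_append_left h1, ← List.getD_eq_getElem?_getD]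
          · intro k hk
            rw [List.getD_eq_getElem?_getD, List.getElem?_append_left (by omega), ← List.getD_eq_getElem?_getD]
            exact h3 k hk
        | none =>
          rw [List.findIdx?_eq_none_iff] at hfe ⊢
          intro sub hsub
          rcases List.mem_append.1 hsub with h | h
          · exact hfe sub h
          · simp only [List.mem_singleton] at h
            subst h
            simpa using he
      rw [hfix]
  | some j =>
    -- j = min over the owners of net's elements = index of the first kept network meeting net
    obtain ⟨e0, he0, n0, hn0, hj⟩ := (hcand j).1 (PySem.List.min?_mem hmin)
    subst hj
    have hmins := PySem.List.min?_isMin hmin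
    have hn0c := (pv_findIdx?_char (fun sub => decide (e0 ∈ sub)) [] finals n0).1 hn0
    have hlow : ∀ k, k < n0 → (decide (∃ e ∈ net, e ∈ finals.getD k []) = false) := by
      intro k hk
      simp only [decide_eq_false_iff_not]
      rintro ⟨e, he, hek⟩
      cases hfe : finals.findIdx? (fun sub => decide (e ∈ sub)) with
      | none =>
        have hmem : finals.getD k [] ∈ finals := by
          rw [List.getD_eq_getElem?_getD, List.getElem?_eq_getElem (by omega)]
          exact List.getElem_mem (by omega)
        have := (List.findIdx?_eq_none_iff.1 hfe) (finals.getD k []) hmem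
        rw [decide_eq_false_iff_not] at this
        exact this hek
      | some m =>
        have hmem : ((m : Nat) : Int) ∈ net.filterMap (fun e => owner.get? e) :=
          (hcand _).2 ⟨e, he, m, hfe, rfl⟩
        have hle : ((n0 : Nat) : Int) ≤ ((m : Nat) : Int) := hmins _ hmem
        have hmc := (pv_findIdx?_char (fun sub => decide (e ∈ sub)) [] finals m).1 hfe
        have hmk : m ≤ k := by
          by_contra hgt
          have := hmc.2.2 k (by omega)
          rw [decide_eq_false_iff_not] at this
          exact this hek
        omega
    have hA : finals.findIdx? (fun sub => decide (∃ e ∈ net, e ∈ sub)) = some n0 := by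
      rw [pv_findIdx?_char (d := [])]
      exact ⟨hn0c.1, by simp only [decide_eq_true_eq]; exact ⟨e0, he0, by simpa using hn0c.2.1⟩, hlow⟩
    rw [pv_goA_some net finals n0 hA]
    have hsetB : PySem.List.pySetD finals ((n0 : Nat) : Int)
        (PySem.Set.update (PySem.List.pyGetD finals ((n0 : Nat) : Int) []) net)
        = finals.set n0 (PySem.Set.update (finals.getD n0 []) net) := by
      rw [PySem.List.pySetD_natCast, PySem.List.pyGetD_natCast]
    constructor
    · exact hsetB
    -- the invariant after the merge
    · intro e
      show (pvAssign owner net ((n0 : Nat) : Int)).get? e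
          = pvOwnerSpec (finals.set n0 (PySem.Set.update (finals.getD n0 []) net)) e
      rw [pv_get?_assign]
      by_cases he : e ∈ net
      · rw [if_pos he]
        unfold pvOwnerSpec
        have hnew : (finals.set n0 (PySem.Set.update (finals.getD n0 []) net)).findIdx?
            (fun sub => decide (e ∈ sub)) = some n0 := by
          rw [pv_findIdx?_char (d := [])]
          refine ⟨by simpa using hn0c.1, ?_, ?_⟩
          · rw [pv_set_getD, if_pos ⟨rfl, hn0c.1⟩]
            simp only [decide_eq_true_eq]
            rw [PySem.Set.mem_update]
            exact Or.inr he
          · intro k hk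
            rw [pv_set_getD, if_neg (by omega)]
            have := hlow k hk
            simp only [decide_eq_false_iff_not] at this ⊢
            intro hek
            exact this ⟨e, he, hek⟩
        rw [hnew]
      · rw [if_neg he, hInv e]
        unfold pvOwnerSpec
        have hsame : ∀ k : Nat,
            (decide (e ∈ (finals.set n0 (PySem.Set.update (finals.getD n0 []) net)).getD k []))
              = decide (e ∈ finals.getD k []) := by
          intro k
          rw [pv_set_getD]
          split_ifs with h
          · obtain ⟨rfl, _⟩ := h
            simp only [decide_eq_decide]
            rw [PySem.Set.mem_update]
            constructor
            · rintro (h' | h')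
              · exact h'
              · exact absurd h' he
            · exact Or.inl
          · rfl
        have hfix : (finals.set n0 (PySem.Set.update (finals.getD n0 []) net)).findIdx?
            (fun sub => decide (e ∈ sub)) = finals.findIdx? (fun sub => decide (e ∈ sub)) := by
          cases hfe : finals.findIdx? (fun sub => decide (e ∈ sub)) with
          | some m =>
            rw [pv_findIdx?_char (d := [])] at hfe
            obtain ⟨h1, h2, h3⟩ := hfe
            rw [pv_findIdx?_char (d := [])]
            exact ⟨by simpa using h1, by rw [hsame]; exact h2, fun k hk => by rw [hsame]; exact h3 k hk⟩
          | none =>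
            rw [List.findIdx?_eq_none_iff] at hfe ⊢
            intro sub hsub
            rcases List.mem_or_eq_of_mem_set hsub with h | h
            · exact hfe sub h
            · subst h
              simp only [decide_eq_false_iff_not]
              rw [PySem.Set.mem_update]
              rintro (h' | h')
              · have hmem : finals.getD n0 [] ∈ finals ∨ finals.getD n0 [] = [] := by
                  by_cases hl : n0 < finals.length
                  · left
                    rw [List.getD_eq_getElem?_getD, List.getElem?_eq_getElem hl]
                    exact List.getElem_mem hl
                  · right
                    rw [List.getD_eq_getElem?_getD, List.getElem?_eq_none (by omega)]
                    rfl
                rcases hmem with hm | hm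
                · have := hfe _ hm
                  rw [decide_eq_false_iff_not] at this
                  exact this h'
                · rw [hm] at h'; simp at h'
              · exact he h'
        rw [hfix]

-- the whole fold, carrying the invariant
theorem pv_loop (nets : List (List Int)) (finals : List (List Int)) (owner : PySem.Dict Int Int)
    (hInv : pvInv finals owner) :
    (nets.foldl pvStepB (finals, owner)).1 = nets.foldl (fun f net => pvGoA net f) finals := by
  induction nets generalizing finals owner with
  | nil => rfl
  | cons net rest ih =>
    obtain ⟨h1, h2⟩ := pv_step finals owner net hInv
    simp only [List.foldl_cons]
    have hpair : pvStepB (finals, owner) net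
        = ((pvStepB (finals, owner) net).1, (pvStepB (finals, owner) net).2) := rfl
    rw [hpair, h1]
    exact ih _ _ (h1 ▸ h2)

-- ===== VERDICT (by name: the statement is the Claim_ definition above) =====
theorem check_network_connections_spec : Claim_equal_check_network_connections := by
  intro all_networks _
  unfold Spec_check_network_connections check_network_connections check_network_connections_alt
  rw [pv_loop all_networks [] PySem.Dict.empty (by
    intro e
    simp [pvOwnerSpec, PySem.Dict.get?_empty])]
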